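-- pv_equiv track=rewrite | github.com/andypymont/adventofcode | 2020/day10.py | adapter_sections
-- ===== SOURCE A (Python) =====
-- from typing import List
--
-- def adapter_sections(adapters: List[int]) -> List[List[int]]:
--     adapters = sorted(adapters)
--     sections = []
--     section = [0]
--     for index, adapter in enumerate(adapters):
--         section.append(adapter)
--         if index == len(adapters) - 1 or adapters[index] + 3 == adapters[index + 1]:
--             if section:
--                 sections.append(section)
--                 section = []
--     return sections
-- ===== SOURCE B (Python) =====
-- from typing import List
--
-- def adapter_sections(adapters: List[int]) -> List[List[int]]:
--     s = sorted(adapters)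
--     if not s:
--         return []
--     bounds = [0] + [i + 1 for i in range(len(s) - 1) if s[i + 1] - s[i] == 3] + [len(s)]
--     sections = [s[a:b] for a, b in zip(bounds, bounds[1:])]
--     return [[0] + sections[0]] + sections[1:]
-- ===== Notes on version B (the rewrite author's own statement) =====
-- stated objective: alternative
-- what changed: Replaces A's streaming accumulator loop (grow a section, flush at each 3-gap) by an index-build-then-slice shape: one pass collects the break indices where consecutive sorted adapters differ by exactly 3, then the sorted list is sliced at those boundaries and 0 is prepended to the first section.
import Mathlib
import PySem

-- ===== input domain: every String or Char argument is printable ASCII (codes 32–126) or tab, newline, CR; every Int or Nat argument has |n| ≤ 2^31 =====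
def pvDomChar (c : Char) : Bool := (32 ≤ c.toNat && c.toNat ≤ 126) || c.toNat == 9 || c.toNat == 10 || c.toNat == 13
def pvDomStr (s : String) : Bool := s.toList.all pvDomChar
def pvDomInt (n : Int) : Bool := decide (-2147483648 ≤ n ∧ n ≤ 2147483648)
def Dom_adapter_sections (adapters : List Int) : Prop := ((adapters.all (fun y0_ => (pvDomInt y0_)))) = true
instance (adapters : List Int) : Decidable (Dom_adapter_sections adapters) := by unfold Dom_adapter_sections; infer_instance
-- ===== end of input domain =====

-- B replaces A's streaming flush-at-gap loop by collecting break indices then slicing (alternative decomposition, same cost).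


-- ===== PORT A =====
def adapter_sections (adapters : List Int) : List (List Int) :=
  let s := PySem.List.sorted adapters (fun x => x) false
  let st := (PySem.List.enumerate s 0).foldl
    (fun (st : List (List Int) × List Int) (p : Int × Int) =>
      let sec := st.2 ++ [p.2]
      -- Python's 'or' short-circuits: adapters[index+1] is only read when index ≠ len-1, where it is
      -- in range; pyGetD's default is never used, so the plain disjunction has the same value.
      if p.1 = PySem.List.len s - 1 ∨ PySem.List.pyGetD s p.1 0 + 3 = PySem.List.pyGetD s (p.1 + 1) 0 then
        if sec = [] then (st.1, sec) else (st.1 ++ [sec], [])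
      else (st.1, sec))
    ([], [0])
  st.1

-- ===== PORT B =====
def adapter_sections_alt (adapters : List Int) : List (List Int) :=
  let s := PySem.List.sorted adapters (fun x => x) false
  if s = [] then []
  else
    let bounds : List Int :=
      0 :: ((PySem.List.pyRange 0 (PySem.List.len s - 1) 1).filter
              (fun i => PySem.List.pyGetD s (i + 1) 0 - PySem.List.pyGetD s i 0 == 3)).map (· + 1)
        ++ [PySem.List.len s]
    let sections := (bounds.zip bounds.tail).map (fun p => PySem.List.slice s (some p.1) (some p.2))
    -- sections[0] is safe in the Python: bounds has at least two entries, so sections is nonempty.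
    (0 :: sections.headD []) :: PySem.List.slice sections (some 1) none

-- ===== PRECONDITION & SPEC =====
def Spec_adapter_sections (adapters : List Int) (out : List (List Int)) : Prop := out = adapter_sections_alt adapters
instance (adapters : List Int) (out : List (List Int)) : Decidable (Spec_adapter_sections adapters out) := by unfold Spec_adapter_sections; infer_instance

-- ===== CLAIM (what is proved, stated in full; the proofs are below) =====
def Claim_equal_adapter_sections : Prop := ∀ (adapters : List Int), Dom_adapter_sections adapters → Spec_adapter_sections adapters (adapter_sections adapters)

-- ===== LEMMAS AND PROOFS =====

-- The common split of a (sorted) list at exact 3-gaps, by structural recursion.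
def pvChunks : List Int → List (List Int)
  | [] => []
  | [x] => [[x]]
  | x :: y :: r =>
    if x + 3 = y then [x] :: pvChunks (y :: r)
    else
      match pvChunks (y :: r) with
      | [] => [[x]]   -- unreachable: pvChunks of a nonempty list is nonempty
      | c :: cs => (x :: c) :: cs

lemma pvChunks_ne_nil (x : Int) (t : List Int) : pvChunks (x :: t) ≠ [] := by
  cases t with
  | nil => simp [pvChunks]
  | cons y r =>
    simp only [pvChunks]
    split
    · simp
    · split <;> simp

lemma pv_getD_drop (s : List Int) (k : Nat) (x : Int) (t : List Int)
    (h : s.drop k = x :: t) : s[k]? = some x := by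
  have := List.getElem?_drop (xs := s) (i := k) (j := 0)
  simpa [h] using this.symm

lemma pv_drop_succ (s : List Int) (k : Nat) (x : Int) (t : List Int)
    (h : s.drop k = x :: t) : s.drop (k + 1) = t := by
  have : s.drop (k + 1) = (s.drop k).drop 1 := by
    rw [List.drop_drop]
  simp [this, h]

lemma pv_foldA (s : List Int) :
    ∀ (u : List Int) (k : Nat) (secs : List (List Int)) (sec : List Int),
      s.drop k = u → k + u.length = s.length →
      (PySem.List.enumerate u (k : Int)).foldl
        (fun (st : List (List Int) × List Int) (p : Int × Int) =>
          let sc := st.2 ++ [p.2]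
          if p.1 = PySem.List.len s - 1 ∨ PySem.List.pyGetD s p.1 0 + 3 = PySem.List.pyGetD s (p.1 + 1) 0 then
            if sc = [] then (st.1, sc) else (st.1 ++ [sc], [])
          else (st.1, sc)) (secs, sec)
      = match pvChunks u with
        | [] => (secs, sec)
        | c :: cs => (secs ++ (sec ++ c) :: cs, []) := by
  intro u
  induction u with
  | nil =>
    intro k secs sec _ _
    simp [PySem.List.enumerate_nil, pvChunks]
  | cons x t ih =>
    intro k secs sec hd hl
    have hx : s[k]? = some x := pv_getD_drop s k x t hd
    have hdt : s.drop (k + 1) = t := pv_drop_succ s k x t hd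
    rw [PySem.List.enumerate_cons, List.foldl_cons]
    cases t with
    | nil =>
      have hk : (k : Int) = PySem.List.len s - 1 := by
        simp only [PySem.List.len_eq]
        simp at hl
        omega
      simp only [hk]
      simp [PySem.List.enumerate_nil, pvChunks]
    | cons y r =>
      have hy : s[k + 1]? = some y := pv_getD_drop s (k + 1) y r hdt
      have hkne : ¬ ((k : Int) = PySem.List.len s - 1) := by
        simp only [PySem.List.len_eq]
        simp at hl
        omega
      have hcast : (k : Int) + 1 = ((k + 1 : Nat) : Int) := by push_cast; ring
      have hget1 : PySem.List.pyGetD s ((k : Int)) 0 = x := by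
        simp [List.getD_eq_getElem?_getD, hx]
      have hget2 : PySem.List.pyGetD s ((k : Int) + 1) 0 = y := by
        rw [hcast, PySem.List.pyGetD_natCast]
        simp [List.getD_eq_getElem?_getD, hy]
      obtain ⟨c, cs, hc⟩ : ∃ c cs, pvChunks (y :: r) = c :: cs := by
        cases hcc : pvChunks (y :: r) with
        | nil => exact absurd hcc (pvChunks_ne_nil y r)
        | cons c cs => exact ⟨c, cs, rfl⟩
      have hlen' : (k + 1) + (y :: r).length = s.length := by simp at hl ⊢; omega
      by_cases hxy : x + 3 = y
      · have hcondT : (k : Int) = PySem.List.len s - 1 ∨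
            PySem.List.pyGetD s (k : Int) 0 + 3 = PySem.List.pyGetD s ((k : Int) + 1) 0 :=
          Or.inr (by rw [hget1, hget2]; exact_mod_cast congrArg (fun z => z) (by rw [hxy]))
        simp only [if_pos hcondT]
        have hne : sec ++ [x] ≠ [] := by simp
        simp only [if_neg hne]
        rw [hcast, ih (k + 1) (secs ++ [sec ++ [x]]) [] hdt hlen']
        simp [pvChunks, hxy, hc]
      · have hcond : ¬ ((k : Int) = PySem.List.len s - 1 ∨
            PySem.List.pyGetD s (k : Int) 0 + 3 = PySem.List.pyGetD s ((k : Int) + 1) 0) := by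
          rw [hget1, hget2]
          tauto
        simp only [if_neg hcond]
        rw [hcast, ih (k + 1) secs (sec ++ [x]) hdt hlen']
        simp [pvChunks, hxy, hc]

-- B's bounds list starting at position k, and the slices it denotes (proof-only helpers).
def pvBounds (s : List Int) (k : Int) : List Int :=
  k :: ((PySem.List.pyRange k (PySem.List.len s - 1) 1).filter
          (fun i => PySem.List.pyGetD s (i + 1) 0 - PySem.List.pyGetD s i 0 == 3)).map (· + 1)
    ++ [PySem.List.len s]

def pvSlices (s : List Int) (bs : List Int) : List (List Int) :=
  (bs.zip bs.tail).map (fun p => PySem.List.slice s (some p.1) (some p.2))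

lemma pv_slice_cons (s : List Int) (k : Nat) (x : Int) (t : List Int) (b : Int)
    (hd : s.drop k = x :: t) (hb : (k : Int) + 1 ≤ b) :
    PySem.List.slice s (some (k : Int)) (some b) =
      x :: PySem.List.slice s (some ((k : Int) + 1)) (some b) := by
  have h0 : (0 : Int) ≤ (k : Int) := by positivity
  have hb0 : (0 : Int) ≤ b := by omega
  have hdt : s.drop (k + 1) = t := pv_drop_succ s k x t hd
  rw [PySem.List.slice_toNat s h0 hb0, PySem.List.slice_toNat s (by omega) hb0]
  have h1 : ((k : Int)).toNat = k := by omega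
  have h2 : ((k : Int) + 1).toNat = k + 1 := by omega
  rw [h1, h2, hd, hdt]
  have h3 : b.toNat - k = (b.toNat - (k + 1)) + 1 := by omega
  rw [h3, List.take_succ_cons]

lemma pv_foldB (s : List Int) : ∀ (u : List Int) (k : Nat),
    s.drop k = u → k + u.length = s.length → u ≠ [] →
    pvSlices s (pvBounds s (k : Int)) = pvChunks u := by
  intro u
  induction u with
  | nil => intro k _ _ hne; exact absurd rfl hne
  | cons x t ih =>
    intro k hd hl _
    have hx : s[k]? = some x := pv_getD_drop s k x t hd
    have hdt : s.drop (k + 1) = t := pv_drop_succ s k x t hd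
    have hget1 : PySem.List.pyGetD s ((k : Int)) 0 = x := by
      simp [List.getD_eq_getElem?_getD, hx]
    cases t with
    | nil =>
      have hn : k + 1 = s.length := by simpa using hl
      have hrange : PySem.List.pyRange (k : Int) (PySem.List.len s - 1) 1 = [] := by
        apply PySem.List.pyRange_one_eq_nil
        simp [PySem.List.len_eq]; omega
      have hbs : pvBounds s (k : Int) = [(k : Int), (s.length : Int)] := by
        rw [pvBounds, hrange]
        simp [PySem.List.len_eq]
      rw [hbs]
      simp only [pvSlices, List.zip, List.tail, List.zipWith, List.map]
      have : PySem.List.slice s (some (k : Int)) (some (s.length : Int)) = [x] := by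
        rw [PySem.List.slice_natCast]
        rw [hd]
        have h1 : s.length - k = 1 := by omega
        simp [h1]
      rw [this]
      rfl
    | cons y r =>
      have hy : s[k + 1]? = some y := pv_getD_drop s (k + 1) y r hdt
      have hcast : (k : Int) + 1 = ((k + 1 : Nat) : Int) := by push_cast; ring
      have hget2 : PySem.List.pyGetD s ((k : Int) + 1) 0 = y := by
        rw [hcast, PySem.List.pyGetD_natCast]
        simp [List.getD_eq_getElem?_getD, hy]
      have hlen' : (k + 1) + (y :: r).length = s.length := by simp at hl ⊢; omega
      have hlt : (k : Int) < PySem.List.len s - 1 := by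
        simp only [PySem.List.len_eq]
        simp at hl
        omega
      have hrange : PySem.List.pyRange (k : Int) (PySem.List.len s - 1) 1 =
          (k : Int) :: PySem.List.pyRange ((k : Int) + 1) (PySem.List.len s - 1) 1 :=
        PySem.List.pyRange_one_cons hlt
      obtain ⟨c, cs, hc⟩ : ∃ c cs, pvChunks (y :: r) = c :: cs := by
        cases hcc : pvChunks (y :: r) with
        | nil => exact absurd hcc (pvChunks_ne_nil y r)
        | cons c cs => exact ⟨c, cs, rfl⟩
      have ihr := ih (k + 1) hdt hlen' (by simp)
      rw [hc] at ihr
      by_cases hxy : x + 3 = y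
      · have hfil : ((PySem.List.pyRange (k : Int) (PySem.List.len s - 1) 1).filter
            (fun i => PySem.List.pyGetD s (i + 1) 0 - PySem.List.pyGetD s i 0 == 3)) =
            (k : Int) :: ((PySem.List.pyRange ((k : Int) + 1) (PySem.List.len s - 1) 1).filter
            (fun i => PySem.List.pyGetD s (i + 1) 0 - PySem.List.pyGetD s i 0 == 3)) := by
          rw [hrange, List.filter_cons]
          simp [hget1, hget2, show y - x = 3 by omega]
        have hbs : pvBounds s (k : Int) = (k : Int) :: pvBounds s ((k : Int) + 1) := by
          simp only [pvBounds, hfil, List.map_cons]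
          rfl
        rw [hbs]
        have hslice1 : PySem.List.slice s (some (k : Int)) (some ((k : Int) + 1)) = [x] := by
          rw [hcast, PySem.List.slice_natCast, hd]
          have h1 : (k + 1) - k = 1 := by omega
          simp [h1]
        have hstep : pvSlices s ((k : Int) :: pvBounds s ((k : Int) + 1)) =
            PySem.List.slice s (some (k : Int)) (some ((k : Int) + 1)) ::
              pvSlices s (pvBounds s ((k : Int) + 1)) := by
          simp [pvSlices, pvBounds]
        rw [hstep, hslice1, hcast, ihr]
        simp [pvChunks, hxy, hc]
      · have hfil : ((PySem.List.pyRange (k : Int) (PySem.List.len s - 1) 1).filter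
            (fun i => PySem.List.pyGetD s (i + 1) 0 - PySem.List.pyGetD s i 0 == 3)) =
            ((PySem.List.pyRange ((k : Int) + 1) (PySem.List.len s - 1) 1).filter
            (fun i => PySem.List.pyGetD s (i + 1) 0 - PySem.List.pyGetD s i 0 == 3)) := by
          rw [hrange, List.filter_cons]
          simp [hget1, hget2, show ¬ (y - x = 3) by omega]
        -- the tail of the bounds list is nonempty and its head is ≥ k+1
        obtain ⟨b0, rest1, hrest, hb0⟩ : ∃ b0 rest1,
            ((PySem.List.pyRange ((k : Int) + 1) (PySem.List.len s - 1) 1).filter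
              (fun i => PySem.List.pyGetD s (i + 1) 0 - PySem.List.pyGetD s i 0 == 3)).map (· + 1)
              ++ [PySem.List.len s] = b0 :: rest1 ∧ (k : Int) + 1 ≤ b0 := by
          cases hF : ((PySem.List.pyRange ((k : Int) + 1) (PySem.List.len s - 1) 1).filter
              (fun i => PySem.List.pyGetD s (i + 1) 0 - PySem.List.pyGetD s i 0 == 3)) with
          | nil =>
            refine ⟨PySem.List.len s, [], by simp, ?_⟩
            simp only [PySem.List.len_eq]
            simp at hl
            omega
          | cons a F' =>
            refine ⟨a + 1, F'.map (· + 1) ++ [PySem.List.len s], by simp, ?_⟩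
            have ha : a ∈ PySem.List.pyRange ((k : Int) + 1) (PySem.List.len s - 1) 1 :=
              List.mem_of_mem_filter (by rw [hF]; exact List.mem_cons_self)
            have := (PySem.List.mem_pyRange_one.mp ha).1
            omega
        have hbsA : pvBounds s (k : Int) = (k : Int) :: b0 :: rest1 := by
          rw [pvBounds, hfil, List.cons_append, hrest]
        have hbsB : pvBounds s ((k : Int) + 1) = ((k : Int) + 1) :: b0 :: rest1 := by
          rw [pvBounds, List.cons_append, hrest]
        rw [← hcast, hbsB] at ihr
        have hstepB : pvSlices s (((k : Int) + 1) :: b0 :: rest1) =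
            PySem.List.slice s (some ((k : Int) + 1)) (some b0) ::
              pvSlices s (b0 :: rest1) := by simp [pvSlices]
        rw [hstepB] at ihr
        have hc1 : PySem.List.slice s (some ((k : Int) + 1)) (some b0) = c :=
          (List.cons.injEq _ _ _ _ ▸ ihr).1
        have hc2 : pvSlices s (b0 :: rest1) = cs := (List.cons.injEq _ _ _ _ ▸ ihr).2
        rw [hbsA]
        have hstepA : pvSlices s ((k : Int) :: b0 :: rest1) =
            PySem.List.slice s (some (k : Int)) (some b0) ::
              pvSlices s (b0 :: rest1) := by simp [pvSlices]
        rw [hstepA, pv_slice_cons s k x (y :: r) b0 hd hb0, hc1, hc2]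
        simp [pvChunks, hxy, hc]

theorem adapter_sections_spec : Claim_equal_adapter_sections := by
  intro adapters _
  unfold Spec_adapter_sections adapter_sections adapter_sections_alt
  set s := PySem.List.sorted adapters (fun x => x) false with hs
  by_cases hnil : s = []
  · simp [hnil, PySem.List.enumerate_nil]
  · obtain ⟨x, t, hxt⟩ : ∃ x t, s = x :: t := List.exists_cons_of_ne_nil hnil
    obtain ⟨c, cs, hc⟩ : ∃ c cs, pvChunks s = c :: cs := by
      rw [hxt]
      cases hcc : pvChunks (x :: t) with
      | nil => exact absurd hcc (pvChunks_ne_nil x t)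
      | cons c cs => exact ⟨c, cs, rfl⟩
    have hzero : ((0 : Nat) : Int) = (0 : Int) := rfl
    have hA := pv_foldA s s 0 [] [0] (by simp) (by simp)
    rw [hzero] at hA
    have hB := pv_foldB s s 0 (by simp) (by simp) hnil
    rw [hzero] at hB
    rw [hc] at hA hB
    simp only [hA, if_neg hnil]
    have hBexp : pvSlices s (pvBounds s 0) =
        (List.zip
          (0 :: ((PySem.List.pyRange 0 (PySem.List.len s - 1) 1).filter
            (fun i => PySem.List.pyGetD s (i + 1) 0 - PySem.List.pyGetD s i 0 == 3)).map (· + 1)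
            ++ [PySem.List.len s])
          ((0 :: ((PySem.List.pyRange 0 (PySem.List.len s - 1) 1).filter
            (fun i => PySem.List.pyGetD s (i + 1) 0 - PySem.List.pyGetD s i 0 == 3)).map (· + 1)
            ++ [PySem.List.len s]).tail)).map
          (fun p => PySem.List.slice s (some p.1) (some p.2)) := rfl
    rw [hBexp] at hB
    rw [hB]
    simp [PySem.List.slice_from_one]
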